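-- pv_equiv track=rewrite | github.com/Eyal-Elisha/ShopLab | auto_scanner/scanners/http_checks/__init__.py | _first_locs
-- ===== SOURCE A (Python) =====
-- from typing import Callable, Dict, Iterable, List, Optional, Sequence, Tuple
--
-- def _first_locs(body: str) -> str:
--     out: List[str] = []
--     text = body.lower()
--     pos = 0
--     while True:
--         start = text.find("<loc>", pos)
--         if start < 0:
--             break
--         end = text.find("</loc>", start)
--         if end < 0:
--             break
--         out.append(body[start + 5 : end].strip())
--         pos = end + 6
--         if len(out) >= 8:
--             break
--     return ", ".join(out)
-- ===== SOURCE B (Python) =====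
-- def _first_locs(body: str) -> str:
--     # Staged approach: precompute ALL tag positions in two passes, then pair
--     # them with two monotone pointers (no text scanning during pairing).
--     text = body.lower()
--     n = len(text)
--     opens = [i for i in range(n) if text.startswith("<loc>", i)]
--     closes = [i for i in range(n) if text.startswith("</loc>", i)]
--     out = []
--     pos = 0
--     oi = 0
--     ci = 0
--     while len(out) < 8:
--         while oi < len(opens) and opens[oi] < pos:
--             oi += 1
--         if oi == len(opens):
--             break
--         s = opens[oi]
--         while ci < len(closes) and closes[ci] < s:
--             ci += 1
--         if ci == len(closes):
--             break
--         e = closes[ci]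
--         out.append(body[s + 5:e].strip())
--         pos = e + 6
--     return ", ".join(out)
-- ===== Notes on version B (the rewrite author's own statement) =====
-- stated objective: alternative
-- what changed: Replaces A's single incremental find/pos-advance loop with staged passes: first build the complete sorted lists of all '<loc>' and '</loc>' occurrence positions, then pair them with two monotone pointers (no text search during pairing), still joining the first 8 stripped contents.
import Mathlib
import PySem

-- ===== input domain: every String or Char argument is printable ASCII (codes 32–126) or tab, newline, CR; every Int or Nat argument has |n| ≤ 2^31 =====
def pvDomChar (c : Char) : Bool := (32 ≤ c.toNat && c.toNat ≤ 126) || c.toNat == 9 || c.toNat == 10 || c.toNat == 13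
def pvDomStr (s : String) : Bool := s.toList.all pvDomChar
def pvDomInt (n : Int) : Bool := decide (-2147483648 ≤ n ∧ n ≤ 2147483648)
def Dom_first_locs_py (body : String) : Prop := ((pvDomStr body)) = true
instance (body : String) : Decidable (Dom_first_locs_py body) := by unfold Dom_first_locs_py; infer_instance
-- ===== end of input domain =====

-- B replaces A's incremental find/pos loop by two staged index-building passes
-- (all "<loc>" and "</loc>" positions) followed by a two-pointer merge (objective: alternative, not faster).

-- ===== PORT A =====
-- A: while loop over `pos`, using text.find("<loc>", pos) and text.find("</loc>", start).
def pvLoc : List Char := "<loc>".toList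
def pvLocEnd : List Char := "</loc>".toList

def pvLoopA (body text : List Char) (out : List (List Char)) (pos : Int) : List (List Char) :=
  let start := PySem.Chars.findFrom text pvLoc pos none
  if start < 0 then out
  else
    let e := PySem.Chars.findFrom text pvLocEnd start none
    if e < 0 then out
    else
      let out' := out ++ [PySem.Chars.strip (PySem.List.slice body (some (start + 5)) (some e))]
      if h : 8 ≤ out'.length then out'
      else pvLoopA body text out' (e + 6)
termination_by 8 - out.length
decreasing_by simp [out'] at h ⊢; omega

def first_locs_py (body : String) : String :=
  String.ofList (PySem.Chars.join ", ".toList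
    (pvLoopA body.toList (PySem.Chars.lower body.toList) [] 0))

-- ===== PORT B =====
-- pvOpens = B's `[i for i in range(n) if text.startswith(pat, i)]`
-- (Python's text.startswith(pat, i) with 0 ≤ i ≤ n is exactly startswith on text.drop i).
def pvOpens (text pat : List Char) : List Nat :=
  (List.range text.length).filter (fun i => PySem.Chars.startswith (text.drop i) pat)

-- B's pairing loop. The pointer advances `while opens[oi] < pos: oi += 1` are
-- represented by dropWhile on the not-yet-passed suffix of each index list
-- (the suffix from the current pointer on), which is the same traversal.
def pvLoopB (body : List Char) (out : List (List Char)) (pos : Nat)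
    (opens closes : List Nat) : List (List Char) :=
  if 8 ≤ out.length then out
  else
    match opens.dropWhile (· < pos) with
    | [] => out
    | s :: rest =>
      match closes.dropWhile (· < s) with
      | [] => out
      | e :: rest' =>
        pvLoopB body
          (out ++ [PySem.Chars.strip (PySem.List.slice body (some ((s : Int) + 5)) (some (e : Int)))])
          (e + 6) (s :: rest) (e :: rest')
termination_by 8 - out.length
decreasing_by simp; omega

def first_locs_py_alt (body : String) : String :=
  let text := PySem.Chars.lower body.toList
  String.ofList (PySem.Chars.join ", ".toList
    (pvLoopB body.toList [] 0 (pvOpens text pvLoc) (pvOpens text pvLocEnd)))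

-- ===== PRECONDITION & SPEC =====
def Spec_first_locs_py (body : String) (out : String) : Prop := out = first_locs_py_alt body
instance (body : String) (out : String) : Decidable (Spec_first_locs_py body out) := by unfold Spec_first_locs_py; infer_instance

-- ===== CLAIM (what is proved, stated in full; the proofs are below) =====
def Claim_equal_first_locs_py : Prop := ∀ (body : String), Dom_first_locs_py body → Spec_first_locs_py body (first_locs_py body)

-- ===== LEMMAS AND PROOFS =====

-- Proof-only helper: the index of the first occurrence of pat at or after i (none if none).
def pvScan (text pat : List Char) (i : Nat) : Option Nat :=
  if i < text.length then
    if PySem.Chars.startswith (text.drop i) pat then some i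
    else pvScan text pat (i + 1)
  else none
termination_by text.length - i

lemma pvScan_some (text pat : List Char) (i s : Nat) (h : pvScan text pat i = some s) :
    i ≤ s ∧ s < text.length ∧ pat <+: text.drop s ∧
      ∀ k, i ≤ k → k < s → ¬ pat <+: text.drop k := by
  have H : ∀ n i, text.length - i ≤ n → pvScan text pat i = some s →
      i ≤ s ∧ s < text.length ∧ pat <+: text.drop s ∧
        ∀ k, i ≤ k → k < s → ¬ pat <+: text.drop k := by
    intro n
    induction n with
    | zero =>
      intro i hle h
      rw [pvScan, if_neg (show ¬ i < text.length by omega)] at h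
      simp at h
    | succ n ih =>
      intro i hle h
      rw [pvScan] at h
      split_ifs at h with h1 h2
      · obtain rfl : i = s := by simpa using h
        exact ⟨le_refl _, h1, (PySem.Chars.startswith_iff _ _).mp h2, fun k hk hks => absurd (lt_of_le_of_lt hk hks) (lt_irrefl _)⟩
      · obtain ⟨h3, h4, h5, h6⟩ := ih (i + 1) (by omega) h
        refine ⟨by omega, h4, h5, fun k hk hks hpre => ?_⟩
        rcases Nat.eq_or_lt_of_le hk with rfl | hk'
        · exact h2 ((PySem.Chars.startswith_iff _ _).mpr hpre)
        · exact h6 k hk' hks hpre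
  exact H (text.length - i) i (le_refl _) h

lemma pvScan_none (text pat : List Char) (i : Nat) (hpat : pat ≠ [])
    (h : pvScan text pat i = none) : ∀ k, i ≤ k → ¬ pat <+: text.drop k := by
  have H : ∀ n i, text.length - i ≤ n → pvScan text pat i = none →
      ∀ k, i ≤ k → ¬ pat <+: text.drop k := by
    intro n
    induction n with
    | zero =>
      intro i hle _ k hk hpre
      have hdrop : text.drop k = [] := List.drop_eq_nil_of_le (by omega)
      rw [hdrop, List.prefix_nil] at hpre
      exact hpat hpre
    | succ n ih =>
      intro i hle h k hk hpre
      rw [pvScan] at h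
      by_cases h1 : i < text.length
      · rw [if_pos h1] at h
        by_cases h2 : PySem.Chars.startswith (text.drop i) pat
        · rw [if_pos h2] at h
          simp at h
        · rw [if_neg h2] at h
          rcases Nat.eq_or_lt_of_le hk with rfl | hk'
          · exact h2 ((PySem.Chars.startswith_iff _ _).mpr hpre)
          · exact ih (i + 1) (by omega) h k hk' hpre
      · have hdrop : text.drop k = [] := List.drop_eq_nil_of_le (by omega)
        rw [hdrop, List.prefix_nil] at hpre
        exact hpat hpre
  exact H (text.length - i) i (le_refl _) h

lemma findFrom_eq_pvScan (text pat : List Char) (i : Nat) (hpat : pat ≠ [])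
    (hi : i ≤ text.length) :
    PySem.Chars.findFrom text pat (i : Int) none =
      (match pvScan text pat i with | none => (-1 : Int) | some s => (s : Int)) := by
  cases h : pvScan text pat i with
  | none =>
    show PySem.Chars.findFrom text pat (i : Int) none = -1
    rw [PySem.Chars.findFrom_natCast_eq_neg_one_iff text pat i hi]
    intro hinf
    obtain ⟨j, hj⟩ := (PySem.Chars.exists_prefix_drop_iff_isIn pat (text.drop i)).mpr
      ((PySem.Chars.isIn_iff_infix _ _).mpr hinf)
    rw [List.drop_drop] at hj
    exact pvScan_none text pat i hpat h (i + j) (by omega) hj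
  | some s =>
    obtain ⟨h3, _, h5, h6⟩ := pvScan_some text pat i s h
    have hinf : pat <:+: text.drop i := by
      refine (PySem.Chars.isIn_iff_infix _ _).mp ?_
      refine (PySem.Chars.exists_prefix_drop_iff_isIn pat (text.drop i)).mp ⟨s - i, ?_⟩
      rw [List.drop_drop, Nat.add_sub_cancel' h3]
      exact h5
    have hne : PySem.Chars.findFrom text pat (i : Int) none ≠ -1 := by
      rw [ne_eq, PySem.Chars.findFrom_natCast_eq_neg_one_iff text pat i hi]
      exact not_not_intro hinf
    obtain ⟨hf1, hf2, hf3⟩ := PySem.Chars.findFrom_natCast_spec text pat i hi hne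
    set f := PySem.Chars.findFrom text pat (i : Int) none with hf
    have hf0 : 0 ≤ f := le_trans (by exact_mod_cast Int.natCast_nonneg i) hf1
    have hle1 : ¬ f.toNat < s := fun hlt => h6 f.toNat (by omega) hlt hf2
    have hle2 : ¬ s < f.toNat := fun hlt => hf3 s h3 hlt h5
    show f = (s : Int)
    omega

-- pvScan p is the head of the filtered range' starting at p.
lemma pvScan_eq_head (text pat : List Char) :
    ∀ (k p : Nat), text.length - p ≤ k →
      pvScan text pat p =
        ((List.range' p (text.length - p)).filter
          (fun i => PySem.Chars.startswith (text.drop i) pat)).head? := by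
  intro k
  induction k with
  | zero =>
    intro p hle
    rw [pvScan, if_neg (show ¬ p < text.length by omega),
      show text.length - p = 0 by omega]
    simp
  | succ k ih =>
    intro p hle
    rw [pvScan]
    by_cases h1 : p < text.length
    · rw [if_pos h1, show text.length - p = (text.length - (p + 1)) + 1 by omega,
        List.range'_succ, List.filter_cons]
      by_cases h2 : PySem.Chars.startswith (text.drop p) pat
      · simp [h2]
      · simp only [h2]
        rw [ih (p + 1) (by omega)]
        simp
    · rw [if_neg h1, show text.length - p = 0 by omega]
      simp

lemma dropWhile_append_lt (l1 l2 : List Nat) (p : Nat) (h : ∀ x ∈ l1, x < p) :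
    (l1 ++ l2).dropWhile (· < p) = l2.dropWhile (· < p) := by
  induction l1 with
  | nil => rfl
  | cons a t ih =>
    rw [List.cons_append, List.dropWhile_cons,
      if_pos (by simpa using h a (List.mem_cons_self))]
    exact ih (fun x hx => h x (List.mem_cons_of_mem _ hx))

lemma dropWhile_all (l : List Nat) (p : Nat) (h : ∀ x ∈ l, x < p) :
    l.dropWhile (· < p) = [] := by
  induction l with
  | nil => rfl
  | cons a t ih =>
    rw [List.dropWhile_cons, if_pos (by simpa using h a (List.mem_cons_self))]
    exact ih (fun x hx => h x (List.mem_cons_of_mem _ hx))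

lemma dropWhile_ge (l : List Nat) (p : Nat) (h : ∀ x ∈ l, p ≤ x) :
    l.dropWhile (· < p) = l := by
  cases l with
  | nil => rfl
  | cons a t =>
    rw [List.dropWhile_cons, if_neg (by simpa using h a (List.mem_cons_self))]

-- dropWhile (< q) over any suffix of the full index list (all removed elements < q)
-- is the filtered range' from q.
lemma dropWhile_suffix_eq (text pat : List Char) (d X : List Nat) (q : Nat)
    (hfull : pvOpens text pat = d ++ X) (hd : ∀ x ∈ d, x < q) :
    X.dropWhile (· < q) =
      (List.range' q (text.length - q)).filter
        (fun i => PySem.Chars.startswith (text.drop i) pat) := by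
  have hstep : (pvOpens text pat).dropWhile (· < q) = X.dropWhile (· < q) := by
    rw [hfull]; exact dropWhile_append_lt d X q hd
  rw [← hstep]
  unfold pvOpens
  by_cases hq : q ≤ text.length
  · have hsplit : List.range text.length =
        List.range' 0 q ++ List.range' q (text.length - q) := by
      rw [List.range_eq_range']
      have := List.range'_append (s := 0) (m := q) (n := text.length - q) (step := 1)
      simp only [Nat.one_mul, Nat.zero_add] at this
      rw [this, Nat.add_sub_cancel' hq]
    rw [hsplit, List.filter_append]
    rw [dropWhile_append_lt _ _ q (by
      intro x hx
      have := List.mem_range'_1.mp (List.mem_filter.mp hx).1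
      omega)]
    exact dropWhile_ge _ q (by
      intro x hx
      have := List.mem_range'_1.mp (List.mem_filter.mp hx).1
      omega)
  · rw [show text.length - q = 0 by omega]
    simp only [List.range'_zero, List.filter_nil]
    apply dropWhile_all
    intro x hx
    have := List.mem_range.mp (List.mem_filter.mp hx).1
    omega

lemma mem_filter_range' (text pat : List Char) (q x : Nat)
    (hx : x ∈ (List.range' q (text.length - q)).filter
      (fun i => PySem.Chars.startswith (text.drop i) pat)) :
    q ≤ x ∧ x < text.length ∧ pat <+: text.drop x := by
  obtain ⟨h1, h2⟩ := List.mem_filter.mp hx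
  have h3 := List.mem_range'_1.mp h1
  exact ⟨h3.1, by omega, (PySem.Chars.startswith_iff _ _).mp (by simpa using h2)⟩

lemma pvLoop_eq (body text : List Char) :
    ∀ (k : Nat) (out : List (List Char)) (pos : Nat) (dO opens dC closes : List Nat),
      out.length < 8 → 8 - out.length ≤ k → pos ≤ text.length →
      pvOpens text pvLoc = dO ++ opens → (∀ x ∈ dO, x < pos) →
      pvOpens text pvLocEnd = dC ++ closes → (∀ x ∈ dC, x < pos) →
      pvLoopA body text out (pos : Int) = pvLoopB body out pos opens closes := by
  intro k
  induction k with
  | zero => intro out pos dO opens dC closes h8 hk; omega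
  | succ k ih =>
    intro out pos dO opens dC closes h8 hk hpos hO hdO hC hdC
    have hOdrop := dropWhile_suffix_eq text pvLoc dO opens pos hO hdO
    rw [pvLoopA, pvLoopB, if_neg (show ¬ 8 ≤ out.length by omega),
      findFrom_eq_pvScan text pvLoc pos (by decide) hpos,
      pvScan_eq_head text pvLoc (text.length - pos) pos le_rfl, ← hOdrop]
    cases hOs : opens.dropWhile (· < pos) with
    | nil => norm_num
    | cons s rest =>
      obtain ⟨hs1, hs2, hs3⟩ := mem_filter_range' text pvLoc pos s
        (hOdrop ▸ hOs ▸ List.mem_cons_self)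
      simp only [List.head?_cons]
      rw [if_neg (show ¬ ((s : Int) < 0) by omega)]
      have hCdrop := dropWhile_suffix_eq text pvLocEnd dC closes s hC
        (fun x hx => lt_of_lt_of_le (hdC x hx) hs1)
      rw [findFrom_eq_pvScan text pvLocEnd s (by decide) (by omega),
        pvScan_eq_head text pvLocEnd (text.length - s) s le_rfl, ← hCdrop]
      cases hCs : closes.dropWhile (· < s) with
      | nil => norm_num
      | cons e rest' =>
        obtain ⟨he1, he2, he3⟩ := mem_filter_range' text pvLocEnd s e
          (hCdrop ▸ hCs ▸ List.mem_cons_self)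
        have he6 : e + 6 ≤ text.length := by
          have := he3.length_le
          simp [pvLocEnd, List.length_drop] at this
          omega
        simp only [List.head?_cons]
        rw [if_neg (show ¬ ((e : Int) < 0) by omega)]
        set out' := out ++ [PySem.Chars.strip (PySem.List.slice body (some ((s : Int) + 5)) (some (e : Int)))] with hout'
        by_cases h8' : 8 ≤ out'.length
        · rw [dif_pos h8', pvLoopB, if_pos h8']
        · rw [dif_neg h8']
          have hc : ((e : Int) + 6) = ((e + 6 : Nat) : Int) := by push_cast; ring
          rw [hc]
          apply ih out' (e + 6) (dO ++ opens.takeWhile (· < pos)) (s :: rest)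
            (dC ++ closes.takeWhile (· < s)) (e :: rest')
          · simp at h8' ⊢; omega
          · simp [out']; omega
          · exact he6
          · rw [hO, ← hOs, List.append_assoc, List.takeWhile_append_dropWhile]
          · intro x hx
            rcases List.mem_append.mp hx with hx' | hx'
            · have := hdO x hx'; omega
            · have := List.mem_takeWhile_imp hx'
              simp at this; omega
          · rw [hC, ← hCs, List.append_assoc, List.takeWhile_append_dropWhile]
          · intro x hx
            rcases List.mem_append.mp hx with hx' | hx'
            · have := hdC x hx'; omega
            · have := List.mem_takeWhile_imp hx'
              simp at this; omega

-- ===== VERDICT (by name: the statement is the Claim_ definition above) =====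
theorem first_locs_py_spec : Claim_equal_first_locs_py := by
  intro body _
  unfold Spec_first_locs_py first_locs_py first_locs_py_alt
  rw [show ((0 : Int) = ((0 : Nat) : Int)) from rfl,
    pvLoop_eq body.toList (PySem.Chars.lower body.toList) 8 [] 0
      [] (pvOpens (PySem.Chars.lower body.toList) pvLoc)
      [] (pvOpens (PySem.Chars.lower body.toList) pvLocEnd)
      (by simp) (by simp) (by simp) (by simp) (by simp) (by simp) (by simp)]
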